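-- pv_equiv track=rewrite | github.com/Julien-pour/arc_example | 32b_gen0-1/2bee17df/task.py | transform
-- ===== SOURCE A (Python) =====
-- def transform(grid):
--     rows = len(grid)
--     cols = len(grid[0])
--     result = [row[:] for row in grid]
--     inner_top = 1
--     inner_bottom = rows - 2
--     inner_left = 1
--     inner_right = cols - 2
--     for i in range(inner_top, inner_bottom + 1):
--         for j in range(inner_left, inner_right + 1):
--             if result[i][j] == 0:
--                 if all((grid[x][j] == 0 for x in range(inner_top, inner_bottom + 1))) or all((grid[i][y] == 0 for y in range(inner_left, inner_right + 1))):
--                     result[i][j] = 3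
--                 elif i > 1 and grid[i - 1][j] == 3 or (i < inner_bottom and grid[i + 1][j] == 3) or (j > 1 and grid[i][j - 1] == 3) or (j < inner_right and grid[i][j + 1] == 3):
--                     result[i][j] = 3
--     return result
-- ===== SOURCE B (Python) =====
-- def transform(grid):
--     rows = len(grid)
--     cols = len(grid[0])
--     hi = rows - 2
--     right = cols - 2
--     if hi < 1 or right < 1:
--         return [row[:] for row in grid]
--     col_zero = [all(grid[x][j] == 0 for x in range(1, hi + 1)) for j in range(right + 1)]
--     row_zero = [all(grid[i][y] == 0 for y in range(1, right + 1)) for i in range(hi + 1)]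
--
--     def cell(i, j, v):
--         if i < 1 or i > hi or j < 1 or j > right or v != 0:
--             return v
--         if col_zero[j] or row_zero[i]:
--             return 3
--         if (i > 1 and grid[i - 1][j] == 3) or (i < hi and grid[i + 1][j] == 3) \
--            or (j > 1 and grid[i][j - 1] == 3) or (j < right and grid[i][j + 1] == 3):
--             return 3
--         return v
--
--     return [[cell(i, j, v) for j, v in enumerate(row)] for i, row in enumerate(grid)]
-- ===== Notes on version B (the rewrite author's own statement) =====
-- stated objective: alternative
-- what changed: B precomputes per-column and per-row all-zero flags once and builds the output in a single pure pass over the cells (nested comprehension over enumerate), instead of A's re-scanning the whole inner column and row inside every zero cell of the double loop and mutating the result in place; worst-case cost drops from O(rows*cols*(rows+cols)) to O(rows*cols), though on zero-sparse grids A's lazy rescans make the two comparable in practice.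
import Mathlib
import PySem

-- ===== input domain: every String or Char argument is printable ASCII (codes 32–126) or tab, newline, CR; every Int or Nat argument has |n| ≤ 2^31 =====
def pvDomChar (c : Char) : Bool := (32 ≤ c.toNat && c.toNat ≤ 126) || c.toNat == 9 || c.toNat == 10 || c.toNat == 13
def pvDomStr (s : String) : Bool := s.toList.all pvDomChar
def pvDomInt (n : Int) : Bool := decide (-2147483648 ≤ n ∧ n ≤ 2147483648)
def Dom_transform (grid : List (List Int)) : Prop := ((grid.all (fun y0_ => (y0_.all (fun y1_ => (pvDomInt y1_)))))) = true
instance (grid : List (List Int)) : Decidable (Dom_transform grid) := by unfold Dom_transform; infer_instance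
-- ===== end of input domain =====

-- B replaces A's per-cell rescans of the inner row and column by all-zero flags precomputed
-- once, and builds the result functionally in one pass (objective: alternative algorithm).

-- shared indexing helper: grid[i][j] (all indices used are nonnegative and, inside Pre_, in range)
def pvGet2 (g : List (List Int)) (i j : Int) : Int :=
  PySem.List.pyGetD (PySem.List.pyGetD g i []) j 0

-- ===== PORT A =====
def transform (grid : List (List Int)) : List (List Int) :=
  let rows : Int := grid.length
  let cols : Int := (PySem.List.pyGetD grid 0 ([] : List Int)).length
  let innerBottom : Int := rows - 2
  let innerRight : Int := cols - 2
  (PySem.List.pyRange 1 (innerBottom + 1) 1).foldl (fun result i =>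
    (PySem.List.pyRange 1 (innerRight + 1) 1).foldl (fun result j =>
      if pvGet2 result i j == 0 then
        if ((PySem.List.pyRange 1 (innerBottom + 1) 1).all fun x => pvGet2 grid x j == 0)
            || ((PySem.List.pyRange 1 (innerRight + 1) 1).all fun y => pvGet2 grid i y == 0) then
          PySem.List.pySetD result i (PySem.List.pySetD (PySem.List.pyGetD result i []) j 3)
        else if (decide (1 < i) && (pvGet2 grid (i - 1) j == 3))
              || (decide (i < innerBottom) && (pvGet2 grid (i + 1) j == 3))
              || (decide (1 < j) && (pvGet2 grid i (j - 1) == 3))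
              || (decide (j < innerRight) && (pvGet2 grid i (j + 1) == 3)) then
          PySem.List.pySetD result i (PySem.List.pySetD (PySem.List.pyGetD result i []) j 3)
        else result
      else result) result) grid

-- ===== PORT B =====
def transform_alt (grid : List (List Int)) : List (List Int) :=
  let rows : Int := grid.length
  let cols : Int := (PySem.List.pyGetD grid 0 ([] : List Int)).length
  let hi : Int := rows - 2
  let right : Int := cols - 2
  if hi < 1 || right < 1 then grid
  else
    let colZero : List Bool := (PySem.List.pyRange 0 (right + 1) 1).map fun j =>
      (PySem.List.pyRange 1 (hi + 1) 1).all fun x => pvGet2 grid x j == 0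
    let rowZero : List Bool := (PySem.List.pyRange 0 (hi + 1) 1).map fun i =>
      (PySem.List.pyRange 1 (right + 1) 1).all fun y => pvGet2 grid i y == 0
    let cell : Int → Int → Int → Int := fun i j v =>
      if i < 1 || hi < i || j < 1 || right < j || !(v == 0) then v
      else if PySem.List.pyGetD colZero j false || PySem.List.pyGetD rowZero i false then 3
      else if (decide (1 < i) && (pvGet2 grid (i - 1) j == 3))
            || (decide (i < hi) && (pvGet2 grid (i + 1) j == 3))
            || (decide (1 < j) && (pvGet2 grid i (j - 1) == 3))
            || (decide (j < right) && (pvGet2 grid i (j + 1) == 3)) then 3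
      else v
    (PySem.List.enumerate grid).map fun p =>
      (PySem.List.enumerate p.2).map fun q => cell p.1 q.1 q.2

-- ===== PRECONDITION & SPEC =====
-- Pre_ excludes exactly the inputs on which A raises: the empty grid (grid[0] is an
-- IndexError) and, when the inner region is nonempty, grids whose inner rows are shorter
-- than cols-1 (result[i][j] is an IndexError there). Nothing A returns on is excluded.
def Pre_transform (grid : List (List Int)) : Prop :=
  grid ≠ [] ∧
    (3 ≤ grid.length → 3 ≤ (grid.headD []).length →
      ∀ row ∈ (grid.drop 1).take (grid.length - 2),
        (grid.headD []).length - 1 ≤ row.length)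
instance (grid : List (List Int)) : Decidable (Pre_transform grid) := by
  unfold Pre_transform; infer_instance

def pvWitness_transform : List (List Int) := [[1, 1, 1], [1, 0, 1], [1, 1, 1]]

def Spec_transform (grid : List (List Int)) (out : List (List Int)) : Prop := out = transform_alt grid
instance (grid : List (List Int)) (out : List (List Int)) : Decidable (Spec_transform grid out) := by unfold Spec_transform; infer_instance

-- ===== CLAIM (what is proved, stated in full; the proofs are below) =====
def Claim_equal_transform : Prop := ∀ (grid : List (List Int)), Dom_transform grid → Pre_transform grid → Spec_transform grid (transform grid)

-- ===== LEMMAS AND PROOFS =====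

-- the three Boolean tests both programs make on the ORIGINAL grid
def pvColAll (g : List (List Int)) (hi j : Int) : Bool :=
  (PySem.List.pyRange 1 (hi + 1) 1).all fun x => pvGet2 g x j == 0
def pvRowAll (g : List (List Int)) (right i : Int) : Bool :=
  (PySem.List.pyRange 1 (right + 1) 1).all fun y => pvGet2 g i y == 0
def pvAdj (g : List (List Int)) (hi right i j : Int) : Bool :=
     (decide (1 < i) && (pvGet2 g (i - 1) j == 3))
  || (decide (i < hi) && (pvGet2 g (i + 1) j == 3))
  || (decide (1 < j) && (pvGet2 g i (j - 1) == 3))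
  || (decide (j < right) && (pvGet2 g i (j + 1) == 3))

-- the common per-cell result
def pvF (g : List (List Int)) (hi right i j v : Int) : Int :=
  if ((decide (1 ≤ i) && decide (i ≤ hi) && decide (1 ≤ j) && decide (j ≤ right))
      && ((v == 0) && ((pvColAll g hi j || pvRowAll g right i) || pvAdj g hi right i j))) then 3
  else v

-- row i with columns 1 ≤ b < k already processed
def pvPartRow (g : List (List Int)) (hi right i k : Int) (row : List Int) : List Int :=
  row.mapIdx fun b v => if 1 ≤ (b : Int) ∧ (b : Int) < k then pvF g hi right i (b : Int) v else v

-- intermediate state of A's double loop: rows 1 ≤ a < i done, row i done up to column k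
def pvH (g : List (List Int)) (hi right i k : Int) : List (List Int) :=
  g.mapIdx fun a row =>
    if 1 ≤ (a : Int) ∧ (a : Int) < i then pvPartRow g hi right (a : Int) (right + 1) row
    else if (a : Int) = i then pvPartRow g hi right i k row
    else row

theorem mapIdx_eq_self {α : Type} (f : Nat → α → α) (l : List α)
    (h : ∀ (i : Nat) (hi : i < l.length), f i l[i] = l[i]) : l.mapIdx f = l := by
  apply List.ext_getElem (by simp)
  intro i h1 h2
  simp [List.getElem_mapIdx, h]

-- A's inner-loop body, with innerBottom/innerRight abstracted
def pvStepJ (g : List (List Int)) (hi right i : Int) (result : List (List Int)) (j : Int) :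
    List (List Int) :=
  if pvGet2 result i j == 0 then
    if pvColAll g hi j || pvRowAll g right i then
      PySem.List.pySetD result i (PySem.List.pySetD (PySem.List.pyGetD result i []) j 3)
    else if pvAdj g hi right i j then
      PySem.List.pySetD result i (PySem.List.pySetD (PySem.List.pyGetD result i []) j 3)
    else result
  else result

theorem transform_eq_fold (g : List (List Int)) :
    transform g =
      (PySem.List.pyRange 1 ((g.length : Int) - 2 + 1) 1).foldl
        (fun result i =>
          (PySem.List.pyRange 1 (((PySem.List.pyGetD g 0 ([] : List Int)).length : Int) - 2 + 1) 1).foldl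
            (pvStepJ g ((g.length : Int) - 2) (((PySem.List.pyGetD g 0 ([] : List Int)).length : Int) - 2) i) result)
        g := rfl

theorem length_pvPartRow (g : List (List Int)) (hi right i k : Int) (row : List Int) :
    (pvPartRow g hi right i k row).length = row.length := by
  simp [pvPartRow]

theorem getElem_pvPartRow (g : List (List Int)) (hi right i k : Int) (row : List Int)
    (b : Nat) (hb : b < row.length) :
    (pvPartRow g hi right i k row)[b]'(by simp [pvPartRow]; omega) =
      if 1 ≤ (b : Int) ∧ (b : Int) < k then pvF g hi right i (b : Int) row[b] else row[b] := by
  simp [pvPartRow]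

theorem pvPartRow_one (g : List (List Int)) (hi right i : Int) (row : List Int) :
    pvPartRow g hi right i 1 row = row := by
  apply mapIdx_eq_self
  intro b hb
  rw [if_neg]
  omega

theorem length_pvH (g : List (List Int)) (hi right i k : Int) :
    (pvH g hi right i k).length = g.length := by
  simp [pvH]

theorem getElem_pvH (g : List (List Int)) (hi right i k : Int) (a : Nat) (ha : a < g.length) :
    (pvH g hi right i k)[a]'(by simp [pvH]; omega) =
      (if 1 ≤ (a : Int) ∧ (a : Int) < i then pvPartRow g hi right (a : Int) (right + 1) g[a]
       else if (a : Int) = i then pvPartRow g hi right i k g[a] else g[a]) := by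
  simp [pvH]

-- state lemmas
theorem pvH_one_one (g : List (List Int)) (hi right : Int) : pvH g hi right 1 1 = g := by
  apply mapIdx_eq_self
  intro a ha
  by_cases h1 : (a : Int) = 1
  · rw [if_neg (by omega), if_pos h1, pvPartRow_one]
  · rw [if_neg (by omega), if_neg h1]

theorem pvPartRow_succ (g : List (List Int)) (hi right i k : Int) (row : List Int)
    (hk1 : 1 ≤ k) (hkn : k.toNat < row.length) :
    pvPartRow g hi right i (k + 1) row =
      (pvPartRow g hi right i k row).set k.toNat (pvF g hi right i k row[k.toNat]) := by
  apply List.ext_getElem (by simp [pvPartRow])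
  intro b hb1 hb2
  rw [List.getElem_set]
  by_cases hbk : b = k.toNat
  · subst hbk
    rw [if_pos rfl]
    rw [getElem_pvPartRow g hi right i (k+1) row k.toNat hkn]
    rw [if_pos (by omega)]
    congr 1
    omega
  · rw [if_neg (by omega)]
    have hb : b < row.length := by simpa [pvPartRow] using hb1
    rw [getElem_pvPartRow g hi right i (k+1) row b hb,
        getElem_pvPartRow g hi right i k row b hb]
    by_cases hlt : 1 ≤ (b : Int) ∧ (b : Int) < k
    · rw [if_pos (by omega), if_pos hlt]
    · rw [if_neg (by omega), if_neg hlt]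

theorem pvH_succ_set (g : List (List Int)) (hi right i k : Int) (hin : i.toNat < g.length)
    (hi0 : 0 ≤ i) (r' : List Int) (hr' : r' = pvPartRow g hi right i (k + 1) g[i.toNat]) :
    (pvH g hi right i k).set i.toNat r' = pvH g hi right i (k + 1) := by
  subst hr'
  apply List.ext_getElem (by simp [pvH])
  intro a ha1 ha2
  have hag : a < g.length := by simpa [pvH] using ha1
  rw [List.getElem_set]
  by_cases hai : a = i.toNat
  · subst hai
    rw [if_pos rfl, getElem_pvH g hi right i (k+1) i.toNat hin]
    rw [if_neg (by omega), if_pos (by omega)]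
  · rw [if_neg (by omega), getElem_pvH g hi right i k a hag, getElem_pvH g hi right i (k+1) a hag]
    simp [show ¬((a : Int) = i) from by omega]


theorem pvF_eq_three (g : List (List Int)) (hi right i j v : Int)
    (h1 : 1 ≤ i) (h2 : i ≤ hi) (h3 : 1 ≤ j) (h4 : j ≤ right) (hv : v = 0)
    (hor : ((pvColAll g hi j || pvRowAll g right i) || pvAdj g hi right i j) = true) :
    pvF g hi right i j v = 3 := by
  unfold pvF
  rw [if_pos (by simp [h1, h2, h3, h4, hv, hor])]

theorem pvF_of_or_false (g : List (List Int)) (hi right i j v : Int)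
    (hor : ((pvColAll g hi j || pvRowAll g right i) || pvAdj g hi right i j) = false) :
    pvF g hi right i j v = v := by
  unfold pvF
  rw [if_neg (by simp [hor])]

theorem pvF_of_ne (g : List (List Int)) (hi right i j v : Int) (hv : v ≠ 0) :
    pvF g hi right i j v = v := by
  unfold pvF
  rw [if_neg (by simp [hv])]

theorem pvH_read_row (g : List (List Int)) (hi right i k : Int) (hi0 : 0 ≤ i)
    (hin : i.toNat < g.length) :
    PySem.List.pyGetD (pvH g hi right i k) i [] = pvPartRow g hi right i k (g[i.toNat]'hin) := by
  rw [PySem.List.pyGetD_eq_getElem _ [] hi0 (by rw [length_pvH]; omega)]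
  rw [getElem_pvH g hi right i k i.toNat hin]
  rw [if_neg (by omega), if_pos (by omega)]

theorem pvH_read_cell (g : List (List Int)) (hi right i k : Int) (hi0 : 0 ≤ i)
    (hin : i.toNat < g.length) (hk1 : 1 ≤ k) (hkn : k.toNat < (g[i.toNat]'hin).length) :
    pvGet2 (pvH g hi right i k) i k = (g[i.toNat]'hin)[k.toNat]'hkn := by
  unfold pvGet2
  rw [pvH_read_row g hi right i k hi0 hin]
  rw [PySem.List.pyGetD_eq_getElem _ 0 (by omega) (by rw [length_pvPartRow]; omega)]
  rw [getElem_pvPartRow g hi right i k _ k.toNat hkn]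
  rw [if_neg (by omega)]

theorem pvPartRow_succ_self (g : List (List Int)) (hi right i k : Int) (row : List Int)
    (hk1 : 1 ≤ k) (hkn : k.toNat < row.length)
    (hF : pvF g hi right i k row[k.toNat] = row[k.toNat]) :
    pvPartRow g hi right i (k + 1) row = pvPartRow g hi right i k row := by
  rw [pvPartRow_succ g hi right i k row hk1 hkn, hF]
  have h1 : k.toNat < (pvPartRow g hi right i k row).length := by rw [length_pvPartRow]; omega
  have h2 : (pvPartRow g hi right i k row)[k.toNat]'h1 = row[k.toNat] := by
    rw [getElem_pvPartRow g hi right i k row k.toNat hkn, if_neg (by omega)]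
  rw [← h2, List.set_getElem_self]

theorem pvH_succ_self (g : List (List Int)) (hi right i k : Int) (hi0 : 0 ≤ i)
    (hin : i.toNat < g.length) (hk1 : 1 ≤ k) (hkn : k.toNat < (g[i.toNat]'hin).length)
    (hF : pvF g hi right i k ((g[i.toNat]'hin)[k.toNat]'hkn) = (g[i.toNat]'hin)[k.toNat]'hkn) :
    pvH g hi right i (k + 1) = pvH g hi right i k := by
  rw [← pvH_succ_set g hi right i k hin hi0 _ rfl]
  rw [pvPartRow_succ_self g hi right i k _ hk1 hkn hF]
  have h1 : i.toNat < (pvH g hi right i k).length := by rw [length_pvH]; exact hin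
  have h2 : (pvH g hi right i k)[i.toNat]'h1 = pvPartRow g hi right i k (g[i.toNat]'hin) := by
    rw [getElem_pvH g hi right i k i.toNat hin, if_neg (by omega), if_pos (by omega)]
  rw [← h2, List.set_getElem_self]

theorem pvStepJ_H (g : List (List Int)) (hi right i k : Int)
    (h1i : 1 ≤ i) (h2i : i ≤ hi) (hk1 : 1 ≤ k) (hk2 : k ≤ right)
    (hin : i.toNat < g.length) (hkn : k.toNat < (g[i.toNat]'hin).length) :
    pvStepJ g hi right i (pvH g hi right i k) k = pvH g hi right i (k + 1) := by
  have hi0 : (0:Int) ≤ i := by omega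
  unfold pvStepJ
  rw [pvH_read_cell g hi right i k hi0 hin hk1 hkn, pvH_read_row g hi right i k hi0 hin]
  set v := (g[i.toNat]'hin)[k.toNat]'hkn with hvdef
  have hsetEq : PySem.List.pySetD (pvH g hi right i k) i
      (PySem.List.pySetD (pvPartRow g hi right i k (g[i.toNat]'hin)) k 3) =
      (pvH g hi right i k).set i.toNat ((pvPartRow g hi right i k (g[i.toNat]'hin)).set k.toNat 3) := by
    rw [PySem.List.pySetD_of_nonneg _ _ (show (0:Int) ≤ k by omega),
        PySem.List.pySetD_of_nonneg _ _ hi0]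
  by_cases hv0 : v = 0
  · rw [if_pos (by simp [hv0])]
    cases hc1 : (pvColAll g hi k || pvRowAll g right i) with
    | true =>
      rw [if_pos rfl, hsetEq]
      have hF : pvF g hi right i k v = 3 :=
        pvF_eq_three g hi right i k v h1i h2i hk1 hk2 hv0 (by rw [hc1, Bool.true_or])
      rw [show (3:Int) = pvF g hi right i k v from hF.symm]
      rw [← pvPartRow_succ g hi right i k _ hk1 hkn]
      exact pvH_succ_set g hi right i k hin hi0 _ rfl
    | false =>
      rw [if_neg (by simp)]
      cases hc2 : pvAdj g hi right i k with
      | true =>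
        rw [if_pos rfl, hsetEq]
        have hF : pvF g hi right i k v = 3 :=
          pvF_eq_three g hi right i k v h1i h2i hk1 hk2 hv0 (by rw [hc1, hc2, Bool.false_or])
        rw [show (3:Int) = pvF g hi right i k v from hF.symm]
        rw [← pvPartRow_succ g hi right i k _ hk1 hkn]
        exact pvH_succ_set g hi right i k hin hi0 _ rfl
      | false =>
        rw [if_neg (by simp)]
        refine (pvH_succ_self g hi right i k hi0 hin hk1 hkn ?_).symm
        exact pvF_of_or_false g hi right i k v (by rw [hc1, hc2, Bool.false_or])
  · rw [if_neg (by simp [hv0])]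
    refine (pvH_succ_self g hi right i k hi0 hin hk1 hkn ?_).symm
    exact pvF_of_ne g hi right i k v hv0

theorem inner_fold (g : List (List Int)) (hi right i : Int)
    (h1i : 1 ≤ i) (h2i : i ≤ hi) (hin : i.toNat < g.length)
    (hrowlen : right + 1 ≤ ((g[i.toNat]'hin).length : Int)) :
    ∀ (K : Nat) (k : Int), 1 ≤ k → k + K = right + 1 →
      (PySem.List.pyRange k (right + 1) 1).foldl (pvStepJ g hi right i) (pvH g hi right i k) =
        pvH g hi right i (right + 1) := by
  intro K
  induction K with
  | zero =>
    intro k hk1 hkE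
    have hkr : k = right + 1 := by omega
    subst hkr
    rw [PySem.List.pyRange_one_eq_nil (by omega)]
    rfl
  | succ K ih =>
    intro k hk1 hkE
    rw [PySem.List.pyRange_one_cons (by omega)]
    rw [List.foldl_cons]
    rw [pvStepJ_H g hi right i k h1i h2i hk1 (by omega) hin (by omega)]
    exact ih (k + 1) (by omega) (by omega)

theorem pvH_row_done (g : List (List Int)) (hi right i : Int) (h1i : 1 ≤ i) :
    pvH g hi right i (right + 1) = pvH g hi right (i + 1) 1 := by
  apply List.ext_getElem (by simp [length_pvH])
  intro a ha1 ha2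
  have hag : a < g.length := by simpa [length_pvH] using ha1
  rw [getElem_pvH g hi right i (right + 1) a hag, getElem_pvH g hi right (i + 1) 1 a hag]
  by_cases hlt : 1 ≤ (a : Int) ∧ (a : Int) < i
  · rw [if_pos hlt, if_pos (by omega)]
  · rw [if_neg hlt]
    by_cases heq : (a : Int) = i
    · rw [if_pos heq, if_pos (by omega), heq]
    · rw [if_neg heq, if_neg (by omega)]
      by_cases heq2 : (a : Int) = i + 1
      · rw [if_pos heq2, pvPartRow_one]
      · rw [if_neg heq2]

theorem outer_fold (g : List (List Int)) (hi right : Int)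
    (hg : hi + 2 ≤ (g.length : Int)) (hr1 : 1 ≤ right)
    (hrows : ∀ (a : Nat) (ha : a < g.length), 1 ≤ (a : Int) → (a : Int) ≤ hi →
      right + 1 ≤ ((g[a]'ha).length : Int)) :
    ∀ (K : Nat) (m : Int), 1 ≤ m → m + K = hi + 1 →
      (PySem.List.pyRange m (hi + 1) 1).foldl
        (fun r i => (PySem.List.pyRange 1 (right + 1) 1).foldl (pvStepJ g hi right i) r)
        (pvH g hi right m 1) = pvH g hi right (hi + 1) 1 := by
  intro K
  induction K with
  | zero =>
    intro m hm1 hmE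
    have hmh : m = hi + 1 := by omega
    subst hmh
    rw [show PySem.List.pyRange (hi + 1) (hi + 1) 1 = [] from PySem.List.pyRange_one_eq_nil (by omega)]
    rfl
  | succ K ih =>
    intro m hm1 hmE
    rw [show PySem.List.pyRange m (hi + 1) 1 = m :: PySem.List.pyRange (m + 1) (hi + 1) 1 from
      PySem.List.pyRange_one_cons (by omega)]
    rw [List.foldl_cons]
    have hin : m.toNat < g.length := by omega
    have hrowlen := hrows m.toNat hin (by omega) (by omega)
    rw [inner_fold g hi right m hm1 (by omega) hin hrowlen right.toNat 1 (by omega) (by omega)]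
    rw [pvH_row_done g hi right m hm1]
    exact ih (m + 1) (by omega) (by omega)

theorem head_getD (g : List (List Int)) :
    PySem.List.pyGetD g 0 ([] : List Int) = g.headD [] := by
  cases g <;> simp [PySem.List.pyGetD_zero]

theorem transform_eq_H (g : List (List Int)) (hPre : Pre_transform g)
    (hhi : 1 ≤ (g.length : Int) - 2)
    (hr : 1 ≤ ((PySem.List.pyGetD g 0 ([] : List Int)).length : Int) - 2) :
    transform g =
      pvH g ((g.length : Int) - 2) (((PySem.List.pyGetD g 0 ([] : List Int)).length : Int) - 2)
        ((g.length : Int) - 2 + 1) 1 := by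
  rw [transform_eq_fold]
  set hi := (g.length : Int) - 2 with hhidef
  set right := ((PySem.List.pyGetD g 0 ([] : List Int)).length : Int) - 2 with hrdef
  have hcols : ((g.headD []).length : Int) = right + 2 := by
    rw [← head_getD]; omega
  have hrows : ∀ (a : Nat) (ha : a < g.length), 1 ≤ (a : Int) → (a : Int) ≤ hi →
      right + 1 ≤ ((g[a]'ha).length : Int) := by
    intro a ha h1 h2
    have hmem : g[a]'ha ∈ (g.drop 1).take (g.length - 2) := by
      have hidx : a - 1 < ((g.drop 1).take (g.length - 2)).length := by
        simp [List.length_take]; omega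
      have hget : ((g.drop 1).take (g.length - 2))[a - 1]'hidx = g[a]'ha := by
        rw [List.getElem_take, List.getElem_drop]
        congr 1
        omega
      rw [← hget]
      exact List.getElem_mem hidx
    have := hPre.2 (by omega) (by omega) _ hmem
    omega
  have hmain := outer_fold g hi right (by omega) (by omega) hrows hi.toNat 1 (by omega) (by omega)
  rw [pvH_one_one] at hmain
  exact hmain

theorem transform_degenerate (g : List (List Int))
    (h : (g.length : Int) - 2 < 1 ∨ ((PySem.List.pyGetD g 0 ([] : List Int)).length : Int) - 2 < 1) :
    transform g = g := by
  rw [transform_eq_fold]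
  by_cases hhi : (g.length : Int) - 2 < 1
  · rw [show PySem.List.pyRange 1 ((g.length : Int) - 2 + 1) 1 = [] from
      PySem.List.pyRange_one_eq_nil (by omega)]
    rfl
  · have hr : ((PySem.List.pyGetD g 0 ([] : List Int)).length : Int) - 2 < 1 := by tauto
    rw [show PySem.List.pyRange 1 (((PySem.List.pyGetD g 0 ([] : List Int)).length : Int) - 2 + 1) 1
        = [] from PySem.List.pyRange_one_eq_nil (by omega)]
    simp only [List.foldl_nil]
    exact List.foldl_fixed _

theorem transform_alt_degenerate (g : List (List Int))
    (h : (g.length : Int) - 2 < 1 ∨ ((PySem.List.pyGetD g 0 ([] : List Int)).length : Int) - 2 < 1) :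
    transform_alt g = g := by
  simp only [transform_alt]
  rw [if_pos]
  simp only [Bool.or_eq_true, decide_eq_true_eq]
  omega

theorem transform_alt_eq_H (g : List (List Int))
    (hhi : 1 ≤ (g.length : Int) - 2)
    (hr : 1 ≤ ((PySem.List.pyGetD g 0 ([] : List Int)).length : Int) - 2) :
    transform_alt g =
      pvH g ((g.length : Int) - 2) (((PySem.List.pyGetD g 0 ([] : List Int)).length : Int) - 2)
        ((g.length : Int) - 2 + 1) 1 := by
  simp only [transform_alt]
  rw [if_neg (by simp only [Bool.or_eq_true, decide_eq_true_eq]; omega)]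
  set hi := (g.length : Int) - 2 with hhidef
  set right := ((PySem.List.pyGetD g 0 ([] : List Int)).length : Int) - 2 with hrdef
  apply List.ext_getElem (by simp [length_pvH, PySem.List.length_enumerate])
  intro a ha1 ha2
  have hag : a < g.length := by
    have := ha1
    simp only [List.length_map, PySem.List.length_enumerate] at this
    exact this
  rw [List.getElem_map]
  rw [PySem.List.getElem_enumerate g 0 a (by simp [PySem.List.length_enumerate]; omega)]
  rw [getElem_pvH g hi right (hi + 1) 1 a hag]
  simp only [zero_add]
  by_cases hinner : 1 ≤ (a : Int) ∧ (a : Int) ≤ hi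
  · rw [if_pos (by omega)]
    apply List.ext_getElem (by simp [length_pvPartRow, PySem.List.length_enumerate])
    intro b hb1 hb2
    have hbg : b < (g[a]'hag).length := by
      have := hb1
      simp only [List.length_map, PySem.List.length_enumerate] at this
      exact this
    rw [List.getElem_map]
    rw [PySem.List.getElem_enumerate (g[a]'hag) 0 b (by simp [PySem.List.length_enumerate]; omega)]
    rw [getElem_pvPartRow g hi right (a : Int) (right + 1) _ b hbg]
    simp only [zero_add]
    set v := (g[a]'hag)[b]'hbg with hvdef
    by_cases hbin : 1 ≤ (b : Int) ∧ (b : Int) ≤ right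
    · conv_rhs => rw [if_pos (show 1 ≤ (b : Int) ∧ (b : Int) < right + 1 by omega)]
      by_cases hv0 : v = 0
      · conv_lhs => rw [if_neg (show ¬((decide ((a:Int) < 1) || decide (hi < (a:Int)) ||
          decide ((b:Int) < 1) || decide (right < (b:Int)) || !(v == 0)) = true) by
            intro hcon
            simp only [Bool.or_eq_true, decide_eq_true_eq, Bool.not_eq_true',
              beq_eq_false_iff_ne] at hcon
            rcases hcon with (((h | h) | h) | h) | h
            · omega
            · omega
            · omega
            · omega
            · exact h hv0)]
        rw [PySem.List.pyGetD_map_pyRange_of_nonneg _ (right + 1) (b : Int) false (by omega) (by omega)]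
        rw [PySem.List.pyGetD_map_pyRange_of_nonneg _ (hi + 1) (a : Int) false (by omega) (by omega)]
        cases hcol : pvColAll g hi (b : Int) with
        | true =>
          rw [show ((PySem.List.pyRange 1 (hi + 1) 1).all fun x => pvGet2 g x (b : Int) == 0) = true
            from hcol]
          rw [if_pos (by rw [Bool.true_or])]
          rw [pvF_eq_three g hi right (a : Int) (b : Int) v (by omega) (by omega) (by omega)
            (by omega) hv0 (by rw [hcol, Bool.true_or, Bool.true_or])]
        | false =>
          rw [show ((PySem.List.pyRange 1 (hi + 1) 1).all fun x => pvGet2 g x (b : Int) == 0) = false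
            from hcol]
          cases hrow : pvRowAll g right (a : Int) with
          | true =>
            rw [show ((PySem.List.pyRange 1 (right + 1) 1).all fun y => pvGet2 g (a : Int) y == 0)
              = true from hrow]
            rw [if_pos (by rw [Bool.false_or])]
            rw [pvF_eq_three g hi right (a : Int) (b : Int) v (by omega) (by omega) (by omega)
              (by omega) hv0 (by rw [hcol, hrow, Bool.false_or, Bool.true_or])]
          | false =>
            rw [show ((PySem.List.pyRange 1 (right + 1) 1).all fun y => pvGet2 g (a : Int) y == 0)
              = false from hrow]
            rw [if_neg (by simp)]
            rw [show (decide (1 < ((a:Nat):Int)) && (pvGet2 g (((a:Nat):Int) - 1) ((b:Nat):Int) == 3)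
              || decide (((a:Nat):Int) < hi) && (pvGet2 g (((a:Nat):Int) + 1) ((b:Nat):Int) == 3)
              || decide (1 < ((b:Nat):Int)) && (pvGet2 g ((a:Nat):Int) (((b:Nat):Int) - 1) == 3)
              || decide (((b:Nat):Int) < right) && (pvGet2 g ((a:Nat):Int) (((b:Nat):Int) + 1) == 3))
              = pvAdj g hi right ((a:Nat):Int) ((b:Nat):Int) from rfl]
            cases hadj : pvAdj g hi right ((a:Nat):Int) ((b:Nat):Int) with
            | true =>
              rw [if_pos rfl]
              rw [pvF_eq_three g hi right (a : Int) (b : Int) v (by omega) (by omega) (by omega)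
                (by omega) hv0 (by rw [hcol, hrow, hadj]; rfl)]
            | false =>
              rw [if_neg (by simp)]
              rw [pvF_of_or_false g hi right (a : Int) (b : Int) v
                (by rw [hcol, hrow, hadj]; rfl)]
      · rw [if_pos (by
          simp only [Bool.or_eq_true, Bool.not_eq_true', beq_eq_false_iff_ne]
          exact Or.inr hv0)]
        rw [pvF_of_ne g hi right (a : Int) (b : Int) v hv0]
    · conv_rhs => rw [if_neg (show ¬(1 ≤ (b : Int) ∧ (b : Int) < right + 1) by omega)]
      rw [if_pos (by simp only [Bool.or_eq_true, decide_eq_true_eq]; omega)]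
  · rw [if_neg (by omega)]
    have hrow0 : (if (a : Int) = hi + 1 then pvPartRow g hi right (hi + 1) 1 (g[a]'hag)
        else g[a]'hag) = g[a]'hag := by
      by_cases heq : (a : Int) = hi + 1
      · rw [if_pos heq, pvPartRow_one]
      · rw [if_neg heq]
    rw [hrow0]
    apply List.ext_getElem (by simp [PySem.List.length_enumerate])
    intro b hb1 hb2
    rw [List.getElem_map]
    rw [PySem.List.getElem_enumerate (g[a]'hag) 0 b (by simp [PySem.List.length_enumerate]; omega)]
    simp only [zero_add]
    rw [if_pos (by simp only [Bool.or_eq_true, decide_eq_true_eq]; omega)]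

-- ===== VERDICT (by name: the statement is the Claim_ definition above) =====
theorem transform_spec : Claim_equal_transform := by
  intro g _ hPre
  unfold Spec_transform
  by_cases hmain : 1 ≤ (g.length : Int) - 2 ∧ 1 ≤ ((PySem.List.pyGetD g 0 ([] : List Int)).length : Int) - 2
  · rw [transform_eq_H g hPre hmain.1 hmain.2, transform_alt_eq_H g hmain.1 hmain.2]
  · rw [transform_degenerate g (by omega), transform_alt_degenerate g (by omega)]
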